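-- pv_equiv track=rewrite | github.com/ninepig/leecode_dd_2024 | zmianjing/hackrankPrac/dd/dashStoreDistance.py | getClosedStore
-- ===== SOURCE A (Python) =====
-- import collections
--
-- def getClosedStore(grid, locations):
--     ## santity check
--     if not grid or len(grid) == 0:
--         return []
--     if not locations or len(locations) == 0:
--         return []
--
--     '''
--     we starting from each D , record all pos with closed distance to a dashStore
--     '''
--     rows = len(grid)
--     cols = len(grid[0])
--     dirs = [(-1, 0), (1, 0), (0, -1), (0, 1)]
--     q = collections.deque()
--     ## need a dict to works as vistied and store distance
--     point_store_dict = dict()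
--     for i in range(rows):
--         for j in range(cols):
--             if grid[i][j] == 'D':
--                 ## we put (row,col,distance) tuble in queue
--                 q.append((i, j, 0))
--                 point_store_dict[(i, j)] = 0
--
--     while q:
--         cur_row, cur_col, cur_dis = q.popleft()
--         for d in dirs:
--             new_row = cur_row + d[0]
--             new_col = cur_col + d[1]
--             if 0 <= new_row < rows and 0 <= new_col < cols and (new_row, new_col) not in point_store_dict:
--                 if grid[new_row][new_col] == ' ':  ## SPACE MEANS ROAD
--                     q.append((new_row, new_col, cur_dis + 1))
--                     point_store_dict[(new_row, new_col)] = cur_dis + 1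
--                 elif grid[new_row][new_col] == 'X':  ## IF x means we can not pass , but we need record pos
--                     point_store_dict[(new_row, new_col)] = cur_dis + 1
--     res = []
--     for item in locations:
--         if (item[0], item[1]) not in point_store_dict:
--             res.append(-1)
--         else:
--             res.append(point_store_dict[(item[0], item[1])])
--
--     return res
-- ===== SOURCE B (Python) =====
-- def getClosedStore(grid, locations):
--     # sanity checks (same contract as the original)
--     if not grid or not locations:
--         return []
--     rows, cols = len(grid), len(grid[0])
--
--     def nbrs(r, c):
--         return ((r - 1, c), (r + 1, c), (r, c - 1), (r, c + 1))
--
--     # phase 1: multi-source BFS by whole levels, over traversable cells only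
--     dist = {}
--     frontier = []
--     for i in range(rows):
--         for j in range(cols):
--             if grid[i][j] == 'D':
--                 dist[(i, j)] = 0
--                 frontier.append((i, j))
--     d = 0
--     while frontier:
--         d += 1
--         nxt = []
--         for r, c in frontier:
--             for nr, nc in nbrs(r, c):
--                 if 0 <= nr < rows and 0 <= nc < cols and (nr, nc) not in dist and grid[nr][nc] == ' ':
--                     dist[(nr, nc)] = d
--                     nxt.append((nr, nc))
--         frontier = nxt
--
--     # phase 2: stamp each obstacle from its closest recorded traversable neighbor
--     road = dict(dist)  # snapshot of the traversable-cell distances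
--     for i in range(rows):
--         for j in range(cols):
--             if grid[i][j] == 'X':
--                 cand = [road[n] for n in nbrs(i, j) if n in road]
--                 if cand:
--                     dist[(i, j)] = min(cand) + 1
--
--     # phase 3: answer the queries
--     return [dist.get((item[0], item[1]), -1) for item in locations]
-- ===== Notes on version B (the rewrite author's own statement) =====
-- stated objective: alternative
-- what changed: BFS is rewritten level-by-level (frontier lists and a level counter instead of a deque of (row,col,dist) triples) and runs over traversable cells only; obstacle cells are never touched during the search and are stamped in a separate pass as min(recorded 4-neighbor)+1; queries are answered with dict.get.
import Mathlib
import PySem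

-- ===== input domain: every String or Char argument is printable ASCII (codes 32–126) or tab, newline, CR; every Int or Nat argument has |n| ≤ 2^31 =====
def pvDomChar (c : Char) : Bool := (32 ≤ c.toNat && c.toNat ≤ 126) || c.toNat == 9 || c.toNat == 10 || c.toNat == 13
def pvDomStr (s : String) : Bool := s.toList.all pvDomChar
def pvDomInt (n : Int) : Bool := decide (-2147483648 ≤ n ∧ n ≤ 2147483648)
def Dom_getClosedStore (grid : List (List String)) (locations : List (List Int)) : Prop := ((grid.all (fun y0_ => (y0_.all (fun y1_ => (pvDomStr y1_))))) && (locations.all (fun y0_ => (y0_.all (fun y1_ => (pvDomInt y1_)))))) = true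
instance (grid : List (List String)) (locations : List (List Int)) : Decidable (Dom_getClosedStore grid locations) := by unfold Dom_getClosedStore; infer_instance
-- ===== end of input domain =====

-- B re-implements the store search as a level-by-level BFS over traversable cells only,
-- stamping obstacle cells afterwards from their closest recorded neighbor (alternative
-- decomposition, same asymptotic cost); return values agree on all inputs where A returns.


-- ===== PORT A =====
-- grid[i][j] (indices in range on every admitted access; pyGetD is exact there)
def pvAt (grid : List (List String)) (i j : Int) : String :=
  PySem.List.pyGetD (PySem.List.pyGetD grid i []) j ""

def pvDirs : List (Int × Int) := [(-1, 0), (1, 0), (0, -1), (0, 1)]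

-- the initial double scan: queue of (i, j, 0) and dict (i, j) ↦ 0 for every 'D' cell
def pvInitA (grid : List (List String)) (rows cols : Int) :
    List (Int × Int × Int) × PySem.Dict (Int × Int) Int :=
  (PySem.List.pyRange 0 rows).foldl (fun st i =>
    (PySem.List.pyRange 0 cols).foldl (fun st j =>
      if pvAt grid i j == "D" then (st.1 ++ [(i, j, 0)], st.2.insert (i, j) 0) else st) st)
    ([], PySem.Dict.empty)

-- the 'while q' loop; fuel is a termination guard only (one unit per pop; shown sufficient in the proofs)
def pvBfsA (grid : List (List String)) (rows cols : Int) :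
    Nat → List (Int × Int × Int) → PySem.Dict (Int × Int) Int → PySem.Dict (Int × Int) Int
  | _, [], d => d
  | 0, _ :: _, d => d
  | fuel + 1, (r, c, dis) :: q, d =>
    let st := pvDirs.foldl (fun (st : List (Int × Int × Int) × PySem.Dict (Int × Int) Int) dir =>
      let nr := r + dir.1
      let nc := c + dir.2
      if 0 ≤ nr ∧ nr < rows ∧ 0 ≤ nc ∧ nc < cols ∧ st.2.contains (nr, nc) = false then
        if pvAt grid nr nc == " " then (st.1 ++ [(nr, nc, dis + 1)], st.2.insert (nr, nc) (dis + 1))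
        else if pvAt grid nr nc == "X" then (st.1, st.2.insert (nr, nc) (dis + 1))
        else st
      else st) (q, d)
    pvBfsA grid rows cols fuel st.1 st.2

def getClosedStore (grid : List (List String)) (locations : List (List Int)) : List Int :=
  if grid = [] then []
  else if locations = [] then []
  else
    let rows : Int := grid.length
    let cols : Int := grid.headI.length
    let init := pvInitA grid rows cols
    let d := pvBfsA grid rows cols (init.1.length + grid.length * grid.headI.length) init.1 init.2
    locations.foldl (fun res item =>
      let key := (PySem.List.pyGetD item 0 0, PySem.List.pyGetD item 1 0)
      if d.contains key = false then res ++ [(-1 : Int)] else res ++ [d.getD key (-1)]) []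

-- ===== PORT B =====
def pvNbrs (r c : Int) : List (Int × Int) := [(r - 1, c), (r + 1, c), (r, c - 1), (r, c + 1)]

-- the initial double scan of B: dict (i, j) ↦ 0 and frontier list of every 'D' cell
def pvInitB (grid : List (List String)) (rows cols : Int) :
    PySem.Dict (Int × Int) Int × List (Int × Int) :=
  (PySem.List.pyRange 0 rows).foldl (fun st i =>
    (PySem.List.pyRange 0 cols).foldl (fun st j =>
      if pvAt grid i j == "D" then (st.1.insert (i, j) 0, st.2 ++ [(i, j)]) else st) st)
    (PySem.Dict.empty, [])

-- one BFS level at distance dd: the nested 'for r, c in frontier: for nr, nc in nbrs(r, c)'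
def pvLevelB (grid : List (List String)) (rows cols dd : Int)
    (st : PySem.Dict (Int × Int) Int × List (Int × Int)) (F : List (Int × Int)) :
    PySem.Dict (Int × Int) Int × List (Int × Int) :=
  F.foldl (fun st p =>
    (pvNbrs p.1 p.2).foldl (fun (st : PySem.Dict (Int × Int) Int × List (Int × Int)) n =>
      if 0 ≤ n.1 ∧ n.1 < rows ∧ 0 ≤ n.2 ∧ n.2 < cols ∧ st.1.contains n = false ∧
          pvAt grid n.1 n.2 == " " then
        (st.1.insert n dd, st.2 ++ [n])
      else st) st) st

-- the 'while frontier' loop of B; fuel (one unit per level) is a termination guard only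
def pvBfsB (grid : List (List String)) (rows cols : Int) :
    Nat → Int → PySem.Dict (Int × Int) Int → List (Int × Int) → PySem.Dict (Int × Int) Int
  | _, _, d, [] => d
  | 0, _, d, _ :: _ => d
  | fuel + 1, lvl, d, F =>
    let st := pvLevelB grid rows cols (lvl + 1) (d, []) F
    pvBfsB grid rows cols fuel (lvl + 1) st.1 st.2

def getClosedStore_alt (grid : List (List String)) (locations : List (List Int)) : List Int :=
  if grid = [] then []
  else if locations = [] then []
  else
    let rows : Int := grid.length
    let cols : Int := grid.headI.length
    let init := pvInitB grid rows cols
    let road := pvBfsB grid rows cols (grid.length * grid.headI.length + 1) 0 init.1 init.2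
    let d2 := (PySem.List.pyRange 0 rows).foldl (fun d i =>
      (PySem.List.pyRange 0 cols).foldl (fun d j =>
        if pvAt grid i j == "X" then
          let cand := (pvNbrs i j).foldl (fun acc n =>
            if road.contains n then acc ++ [road.getD n 0] else acc) []
          match PySem.List.min? cand (fun v => v) with
          | some m => d.insert (i, j) (m + 1)
          | none => d
        else d) d) road
    locations.map (fun item =>
      d2.getD (PySem.List.pyGetD item 0 0, PySem.List.pyGetD item 1 0) (-1))


-- ===== PRECONDITION & SPEC =====
-- Pre_ excludes exactly the inputs where A raises IndexError: a grid row shorter than the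
-- first row (hit by grid[i][j] in the initial scan), or a queried location with fewer than
-- two coordinates (hit by item[1]).
def Pre_getClosedStore (grid : List (List String)) (locations : List (List Int)) : Prop :=
  grid = [] ∨ locations = [] ∨
    ((∀ row ∈ grid, grid.headI.length ≤ row.length) ∧ (∀ item ∈ locations, 2 ≤ item.length))
instance (grid : List (List String)) (locations : List (List Int)) :
    Decidable (Pre_getClosedStore grid locations) := by unfold Pre_getClosedStore; infer_instance

def pvWitness_getClosedStore : List (List String) × List (List Int) :=
  ([["D", " ", "X"]], [[0, 2], [0, 1], [5, 5]])

def Spec_getClosedStore (grid : List (List String)) (locations : List (List Int)) (out : List Int) : Prop := out = getClosedStore_alt grid locations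
instance (grid : List (List String)) (locations : List (List Int)) (out : List Int) : Decidable (Spec_getClosedStore grid locations out) := by unfold Spec_getClosedStore; infer_instance

-- ===== CLAIM (what is proved, stated in full; the proofs are below) =====
def Claim_equal_getClosedStore : Prop := ∀ (grid : List (List String)) (locations : List (List Int)), Dom_getClosedStore grid locations → Pre_getClosedStore grid locations → Spec_getClosedStore grid locations (getClosedStore grid locations)

-- ===== LEMMAS AND PROOFS =====

-- generic paired-fold relation
theorem pvFoldlRel {σ τ α : Type} (Rel : σ → τ → Prop) (f : σ → α → σ) (g : τ → α → τ)
    (l : List α) (s : σ) (t : τ) (h0 : Rel s t) (h : ∀ s t x, x ∈ l → Rel s t → Rel (f s x) (g t x)) :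
    Rel (l.foldl f s) (l.foldl g t) := by
  induction l generalizing s t with
  | nil => exact h0
  | cons x xs ih =>
    exact ih _ _ (h _ _ _ (by simp) h0) (fun s t y hy => h s t y (by simp [hy]))

-- a fold whose second component only collects: it splits
theorem pvFoldlCollect {σ β α : Type} (F : σ → α → σ) (G : σ → α → List β) :
    ∀ (l : List α) (s : σ) (a : List β),
      l.foldl (fun st x => (F st.1 x, st.2 ++ G st.1 x)) (s, a)
        = (l.foldl F s, a ++ (l.foldl (fun st x => (F st.1 x, st.2 ++ G st.1 x)) (s, [])).2) := by
  intro l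
  induction l with
  | nil => simp
  | cons x xs ih =>
    intro s a
    simp only [List.foldl_cons]
    rw [ih (F s x) (a ++ G s x), ih (F s x) ([] ++ G s x)]
    simp
-- queue-side collector
theorem pvFoldlCollectQ {σ β γ α : Type} (F : σ → α → σ) (G : σ → α → List β) (tag : β → γ) :
    ∀ (l : List α) (q : List γ) (s : σ),
      l.foldl (fun st x => (st.1 ++ (G st.2 x).map tag, F st.2 x)) (q, s)
        = (q ++ ((l.foldl (fun st x => (F st.1 x, st.2 ++ G st.1 x)) (s, [])).2).map tag,
           l.foldl F s) := by
  intro l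
  induction l with
  | nil => simp
  | cons x xs ih =>
    intro q s
    simp only [List.foldl_cons]
    rw [ih (q ++ (G s x).map tag) (F s x)]
    rw [pvFoldlCollect F G xs (F s x) ([] ++ G s x)]
    simp

theorem pvFoldlFlat {σ α β : Type} (h : σ → β → σ) (f : α → List β) :
    ∀ (l : List α) (s : σ), (l.flatMap f).foldl h s = l.foldl (fun a p => (f p).foldl h a) s := by
  intro l
  induction l with
  | nil => simp
  | cons x xs ih => intro s; simp [List.foldl_append, ih]

-- min? with identity key: value characterisation
theorem pvMinChar (l : List Int) (m : Int) :
    PySem.List.min? l (fun v => v) = some m ↔ m ∈ l ∧ ∀ y ∈ l, m ≤ y := by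
  constructor
  · intro h
    exact ⟨PySem.List.min?_mem h, fun y hy => PySem.List.min?_isMin h y hy⟩
  · rintro ⟨hm, hle⟩
    cases hmin : PySem.List.min? l (fun v => v) with
    | none =>
      rw [PySem.List.min?_eq_none_iff] at hmin
      simp [hmin] at hm
    | some m' =>
      have h1 := PySem.List.min?_isMin hmin m hm
      have h2 := hle m' (PySem.List.min?_mem hmin)
      exact congrArg some (le_antisymm h1 h2)

theorem pvMinCongr (l l' : List Int) (h : ∀ v, v ∈ l ↔ v ∈ l') :
    PySem.List.min? l (fun v => v) = PySem.List.min? l' (fun v => v) := by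
  cases hmin : PySem.List.min? l (fun v => v) with
  | none =>
    rw [PySem.List.min?_eq_none_iff] at hmin
    subst hmin
    rw [eq_comm, PySem.List.min?_eq_none_iff, List.eq_nil_iff_forall_not_mem]
    intro v hv
    exact absurd ((h v).mpr hv) (List.not_mem_nil)
  | some m =>
    rw [pvMinChar] at hmin
    rw [eq_comm, pvMinChar]
    exact ⟨(h m).mp hmin.1, fun y hy => hmin.2 y ((h y).mpr hy)⟩

def pvOmin (l : List Int) : Option Int := (PySem.List.min? l (fun v => v)).map (· + 1)

theorem pvOminCongr (l l' : List Int) (h : ∀ v, v ∈ l ↔ v ∈ l') : pvOmin l = pvOmin l' := by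
  unfold pvOmin; rw [pvMinCongr l l' h]

theorem pvOmin_eq_none_iff (l : List Int) : pvOmin l = none ↔ l = [] := by
  unfold pvOmin
  cases hmin : PySem.List.min? l (fun v => v) with
  | none => simp [PySem.List.min?_eq_none_iff l _ |>.mp hmin]
  | some m =>
    have := PySem.List.min?_mem hmin
    simp only [Option.map_some]
    constructor
    · intro h; cases h
    · intro h; subst h; cases this

abbrev pvInb (R C : Int) (p : Int × Int) : Prop := 0 ≤ p.1 ∧ p.1 < R ∧ 0 ≤ p.2 ∧ p.2 < C

-- neighbour relation is symmetric
theorem pvNbrs_symm (p n : Int × Int) : n ∈ pvNbrs p.1 p.2 ↔ p ∈ pvNbrs n.1 n.2 := by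
  simp [pvNbrs, Prod.ext_iff]
  omega

-- per-neighbour dict transformer (A side) and collected road cells
def pvDF (g : List (List String)) (R C : Int) (v : Int)
    (d : PySem.Dict (Int × Int) Int) (n : Int × Int) : PySem.Dict (Int × Int) Int :=
  if pvInb R C n ∧ d.contains n = false then
    (if pvAt g n.1 n.2 == " " then d.insert n v
     else if pvAt g n.1 n.2 == "X" then d.insert n v else d)
  else d

def pvDG (g : List (List String)) (R C : Int) (_v : Int)
    (d : PySem.Dict (Int × Int) Int) (n : Int × Int) : List (Int × Int) :=
  if pvInb R C n ∧ d.contains n = false ∧ pvAt g n.1 n.2 == " " then [n] else []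

-- per-neighbour dict transformer (B side: roads only)
def pvBF (g : List (List String)) (R C : Int) (v : Int)
    (d : PySem.Dict (Int × Int) Int) (n : Int × Int) : PySem.Dict (Int × Int) Int :=
  if pvInb R C n ∧ d.contains n = false ∧ pvAt g n.1 n.2 == " " then d.insert n v else d

-- one level, described as a fold over the flattened neighbour list
def pvEdges (F : List (Int × Int)) : List (Int × Int) :=
  F.flatMap (fun p => pvNbrs p.1 p.2)

def pvStepA (g : List (List String)) (R C : Int) (v : Int)
    (d : PySem.Dict (Int × Int) Int) (F : List (Int × Int)) :
    PySem.Dict (Int × Int) Int × List (Int × Int) :=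
  (pvEdges F).foldl (fun st n => (pvDF g R C v st.1 n, st.2 ++ pvDG g R C v st.1 n)) (d, [])

def pvStepB (g : List (List String)) (R C : Int) (v : Int)
    (d : PySem.Dict (Int × Int) Int) (F : List (Int × Int)) :
    PySem.Dict (Int × Int) Int × List (Int × Int) :=
  (pvEdges F).foldl (fun st n => (pvBF g R C v st.1 n, st.2 ++ pvDG g R C v st.1 n)) (d, [])

def pvRunA (g : List (List String)) (R C : Int) :
    Nat → Int → PySem.Dict (Int × Int) Int → List (Int × Int) →
      PySem.Dict (Int × Int) Int × List (Int × Int)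
  | 0, _, d, F => (d, F)
  | m + 1, k, d, F =>
    pvRunA g R C m (k + 1) (pvStepA g R C (k + 1) d F).1 (pvStepA g R C (k + 1) d F).2

def pvRunB (g : List (List String)) (R C : Int) :
    Nat → Int → PySem.Dict (Int × Int) Int → List (Int × Int) →
      PySem.Dict (Int × Int) Int × List (Int × Int)
  | 0, _, d, F => (d, F)
  | m + 1, k, d, F =>
    pvRunB g R C m (k + 1) (pvStepB g R C (k + 1) d F).1 (pvStepB g R C (k + 1) d F).2

def pvPops (g : List (List String)) (R C : Int) :
    Nat → Int → PySem.Dict (Int × Int) Int → List (Int × Int) → Nat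
  | 0, _, _, _ => 0
  | m + 1, k, d, F =>
    F.length + pvPops g R C m (k + 1) (pvStepA g R C (k + 1) d F).1 (pvStepA g R C (k + 1) d F).2

-- the literal per-direction step of port A equals the (queue-append, pvDF) shape
theorem pvPopStepEq (g : List (List String)) (R C r c dis : Int) :
    (fun (st : List (Int × Int × Int) × PySem.Dict (Int × Int) Int) (dir : Int × Int) =>
      if 0 ≤ r + dir.1 ∧ r + dir.1 < R ∧ 0 ≤ c + dir.2 ∧ c + dir.2 < C ∧
          st.2.contains (r + dir.1, c + dir.2) = false then
        if pvAt g (r + dir.1) (c + dir.2) == " " then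
          (st.1 ++ [(r + dir.1, c + dir.2, dis + 1)], st.2.insert (r + dir.1, c + dir.2) (dis + 1))
        else if pvAt g (r + dir.1) (c + dir.2) == "X" then
          (st.1, st.2.insert (r + dir.1, c + dir.2) (dis + 1))
        else st
      else st)
    = fun st dir =>
        (st.1 ++ (pvDG g R C (dis + 1) st.2 (r + dir.1, c + dir.2)).map
            (fun x => (x.1, x.2, dis + 1)),
         pvDF g R C (dis + 1) st.2 (r + dir.1, c + dir.2)) := by
  funext st dir
  simp only [pvDG, pvDF, pvInb]
  split_ifs <;> simp_all

theorem pvNbrs_eq_map_dirs (r c : Int) :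
    pvNbrs r c = pvDirs.map (fun dir => (r + dir.1, c + dir.2)) := by
  simp [pvNbrs, pvDirs]
  omega

-- one pop of the A port processes one cell of the level
theorem pvBfsA_cons (g : List (List String)) (R C : Int) (f : Nat) (r c dis : Int)
    (q : List (Int × Int × Int)) (d : PySem.Dict (Int × Int) Int) :
    pvBfsA g R C (f + 1) ((r, c, dis) :: q) d
      = pvBfsA g R C f
          (q ++ (((pvNbrs r c).foldl
              (fun st n => (pvDF g R C (dis + 1) st.1 n, st.2 ++ pvDG g R C (dis + 1) st.1 n))
              (d, [])).2).map (fun x => (x.1, x.2, dis + 1)))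
          ((pvNbrs r c).foldl
              (fun st n => (pvDF g R C (dis + 1) st.1 n, st.2 ++ pvDG g R C (dis + 1) st.1 n))
              (d, [])).1 := by
  conv_lhs => rw [pvBfsA]
  show pvBfsA g R C f
      (pvDirs.foldl (fun (st : List (Int × Int × Int) × PySem.Dict (Int × Int) Int) (dir : Int × Int) =>
        if 0 ≤ r + dir.1 ∧ r + dir.1 < R ∧ 0 ≤ c + dir.2 ∧ c + dir.2 < C ∧
            st.2.contains (r + dir.1, c + dir.2) = false then
          if pvAt g (r + dir.1) (c + dir.2) == " " then
            (st.1 ++ [(r + dir.1, c + dir.2, dis + 1)], st.2.insert (r + dir.1, c + dir.2) (dis + 1))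
          else if pvAt g (r + dir.1) (c + dir.2) == "X" then
            (st.1, st.2.insert (r + dir.1, c + dir.2) (dis + 1))
          else st
        else st) (q, d)).1
      (pvDirs.foldl (fun (st : List (Int × Int × Int) × PySem.Dict (Int × Int) Int) (dir : Int × Int) =>
        if 0 ≤ r + dir.1 ∧ r + dir.1 < R ∧ 0 ≤ c + dir.2 ∧ c + dir.2 < C ∧
            st.2.contains (r + dir.1, c + dir.2) = false then
          if pvAt g (r + dir.1) (c + dir.2) == " " then
            (st.1 ++ [(r + dir.1, c + dir.2, dis + 1)], st.2.insert (r + dir.1, c + dir.2) (dis + 1))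
          else if pvAt g (r + dir.1) (c + dir.2) == "X" then
            (st.1, st.2.insert (r + dir.1, c + dir.2) (dis + 1))
          else st
        else st) (q, d)).2 = _
  rw [pvPopStepEq g R C r c dis]
  rw [pvNbrs_eq_map_dirs r c, List.foldl_map]
  rw [pvFoldlCollectQ (fun (s : PySem.Dict (Int × Int) Int) (dir : Int × Int) =>
        pvDF g R C (dis + 1) s (r + dir.1, c + dir.2))
      (fun s dir => pvDG g R C (dis + 1) s (r + dir.1, c + dir.2))
      (fun x => (x.1, x.2, dis + 1)) pvDirs q d]
  have hX := pvFoldlCollect (fun (s : PySem.Dict (Int × Int) Int) (dir : Int × Int) =>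
        pvDF g R C (dis + 1) s (r + dir.1, c + dir.2))
      (fun s dir => pvDG g R C (dis + 1) s (r + dir.1, c + dir.2)) pvDirs d []
  rw [show ((pvDirs.foldl (fun (st : PySem.Dict (Int × Int) Int × List (Int × Int)) (dir : Int × Int) =>
        (pvDF g R C (dis + 1) st.1 (r + dir.1, c + dir.2),
         st.2 ++ pvDG g R C (dis + 1) st.1 (r + dir.1, c + dir.2))) (d, [])).1)
      = pvDirs.foldl (fun (s : PySem.Dict (Int × Int) Int) (dir : Int × Int) =>
          pvDF g R C (dis + 1) s (r + dir.1, c + dir.2)) d from congrArg Prod.fst hX]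

-- prepending one cell to a level
theorem pvStepA_cons (g : List (List String)) (R C : Int) (v : Int)
    (d : PySem.Dict (Int × Int) Int) (p : Int × Int) (F : List (Int × Int)) :
    pvStepA g R C v d (p :: F)
      = ((pvStepA g R C v
            ((pvNbrs p.1 p.2).foldl
              (fun st n => (pvDF g R C v st.1 n, st.2 ++ pvDG g R C v st.1 n)) (d, [])).1 F).1,
         ((pvNbrs p.1 p.2).foldl
              (fun st n => (pvDF g R C v st.1 n, st.2 ++ pvDG g R C v st.1 n)) (d, [])).2
           ++ (pvStepA g R C v
            ((pvNbrs p.1 p.2).foldl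
              (fun st n => (pvDF g R C v st.1 n, st.2 ++ pvDG g R C v st.1 n)) (d, [])).1 F).2) := by
  set cell := (pvNbrs p.1 p.2).foldl
      (fun st n => (pvDF g R C v st.1 n, st.2 ++ pvDG g R C v st.1 n)) (d, []) with hcell
  unfold pvStepA pvEdges
  rw [List.flatMap_cons, List.foldl_append, ← hcell]
  rw [show cell = (cell.1, cell.2) from rfl]
  rw [pvFoldlCollect (pvDF g R C v) (pvDG g R C v) (F.flatMap fun p => pvNbrs p.1 p.2) cell.1 cell.2]
  rw [pvFoldlCollect (pvDF g R C v) (pvDG g R C v) (F.flatMap fun p => pvNbrs p.1 p.2) cell.1 []]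

theorem pvDrain (g : List (List String)) (R C : Int) (k : Int) :
    ∀ (F N : List (Int × Int)) (d : PySem.Dict (Int × Int) Int) (f : Nat),
      pvBfsA g R C (F.length + f)
          (F.map (fun p => (p.1, p.2, k)) ++ N.map (fun p => (p.1, p.2, k + 1))) d
        = pvBfsA g R C f ((N ++ (pvStepA g R C (k + 1) d F).2).map (fun p => (p.1, p.2, k + 1)))
            (pvStepA g R C (k + 1) d F).1 := by
  intro F
  induction F with
  | nil => intro N d f; simp [pvStepA, pvEdges]
  | cons p F' ih =>
    intro N d f
    have hlen : (p :: F').length + f = (F'.length + f) + 1 := by simp [List.length_cons]; omega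
    rw [hlen]
    set cell := (pvNbrs p.1 p.2).foldl
        (fun st n => (pvDF g R C (k + 1) st.1 n, st.2 ++ pvDG g R C (k + 1) st.1 n)) (d, [])
      with hcell
    have hcons := pvBfsA_cons g R C (F'.length + f) p.1 p.2 k
        (F'.map (fun p => (p.1, p.2, k)) ++ N.map (fun p => (p.1, p.2, k + 1))) d
    simp only [List.map_cons, List.cons_append]
    rw [show ((p.1, p.2, k) : Int × Int × Int) = (p.1, p.2, k) from rfl]
    rw [hcons, ← hcell]
    rw [List.append_assoc, ← List.map_append]
    rw [ih (N ++ cell.2) cell.1 f]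
    rw [pvStepA_cons g R C (k + 1) d p F', ← hcell]
    simp [List.append_assoc]

theorem pvDrainRun (g : List (List String)) (R C : Int) :
    ∀ (m : Nat) (k : Int) (d : PySem.Dict (Int × Int) Int) (F : List (Int × Int)) (f : Nat),
      pvBfsA g R C (pvPops g R C m k d F + f) (F.map (fun p => (p.1, p.2, k))) d
        = pvBfsA g R C f
            ((pvRunA g R C m k d F).2.map (fun p => (p.1, p.2, k + m)))
            (pvRunA g R C m k d F).1 := by
  intro m
  induction m with
  | zero => intro k d F f; simp [pvPops, pvRunA]
  | succ m ih =>
    intro k d F f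
    rw [show pvPops g R C (m + 1) k d F + f
        = F.length + (pvPops g R C m (k + 1) (pvStepA g R C (k + 1) d F).1 (pvStepA g R C (k + 1) d F).2 + f)
        from by rw [pvPops]; omega]
    rw [show (F.map (fun p => (p.1, p.2, k))) = F.map (fun p => (p.1, p.2, k)) ++ ([] : List (Int × Int)).map (fun p => (p.1, p.2, k + 1)) from by simp]
    rw [pvDrain g R C k F [] d _]
    simp only [List.nil_append]
    rw [ih (k + 1) (pvStepA g R C (k + 1) d F).1 (pvStepA g R C (k + 1) d F).2 f]
    rw [show pvRunA g R C (m + 1) k d F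
        = pvRunA g R C m (k + 1) (pvStepA g R C (k + 1) d F).1 (pvStepA g R C (k + 1) d F).2 from rfl]
    have hk : k + 1 + (m : Int) = k + ((m + 1 : Nat) : Int) := by push_cast; ring
    rw [hk]

-- the literal inner step of port B equals the (pvBF, collect) shape
theorem pvLevelStepEq (g : List (List String)) (R C dd : Int) :
    (fun (st : PySem.Dict (Int × Int) Int × List (Int × Int)) (n : Int × Int) =>
      if 0 ≤ n.1 ∧ n.1 < R ∧ 0 ≤ n.2 ∧ n.2 < C ∧ st.1.contains n = false ∧
          pvAt g n.1 n.2 == " " then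
        (st.1.insert n dd, st.2 ++ [n])
      else st)
    = fun st n => (pvBF g R C dd st.1 n, st.2 ++ pvDG g R C dd st.1 n) := by
  funext st n
  simp only [pvBF, pvDG, pvInb]
  split_ifs <;> simp_all

theorem pvLevelB_eq_step (g : List (List String)) (R C dd : Int)
    (d : PySem.Dict (Int × Int) Int) (F : List (Int × Int)) :
    pvLevelB g R C dd (d, []) F = pvStepB g R C dd d F := by
  unfold pvLevelB pvStepB pvEdges
  rw [pvLevelStepEq g R C dd]
  rw [pvFoldlFlat (fun st n => (pvBF g R C dd st.1 n, st.2 ++ pvDG g R C dd st.1 n))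
    (fun p => pvNbrs p.1 p.2) F (d, [])]

theorem pvStepB_nil (g : List (List String)) (R C v : Int) (d : PySem.Dict (Int × Int) Int) :
    pvStepB g R C v d [] = (d, []) := rfl

theorem pvRunB_nil (g : List (List String)) (R C : Int) :
    ∀ (m : Nat) (k : Int) (d : PySem.Dict (Int × Int) Int), pvRunB g R C m k d [] = (d, []) := by
  intro m
  induction m with
  | zero => intro k d; rfl
  | succ m ih => intro k d; rw [pvRunB, pvStepB_nil]; exact ih (k + 1) d

theorem pvBfsB_eq_run (g : List (List String)) (R C : Int) :
    ∀ (f : Nat) (k : Int) (d : PySem.Dict (Int × Int) Int) (F : List (Int × Int)),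
      pvBfsB g R C f k d F = (pvRunB g R C f k d F).1 := by
  intro f
  induction f with
  | zero => intro k d F; cases F <;> rfl
  | succ f ih =>
    intro k d F
    cases F with
    | nil => rw [pvRunB, pvStepB_nil, pvRunB_nil]; rfl
    | cons p F' =>
      show pvBfsB g R C f (k + 1) (pvLevelB g R C (k + 1) (d, []) (p :: F')).1
          (pvLevelB g R C (k + 1) (d, []) (p :: F')).2 = _
      rw [pvLevelB_eq_step, ih, pvRunB]

theorem pvFoldlInv {σ α : Type} (Inv : σ → Prop) (f : σ → α → σ) (l : List α) (s0 : σ)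
    (h0 : Inv s0) (h : ∀ s x, x ∈ l → Inv s → Inv (f s x)) : Inv (l.foldl f s0) := by
  induction l generalizing s0 with
  | nil => exact h0
  | cons x xs ih =>
    exact ih (f s0 x) (h s0 x (by simp) h0) (fun s y hy => h s y (by simp [hy]))

def pvKInv (R C : Int) (d : PySem.Dict (Int × Int) Int) : Prop :=
  d.keys.Nodup ∧ ∀ p ∈ d.keys, pvInb R C p

theorem pvStepA_grow (g : List (List String)) (R C v : Int)
    (d : PySem.Dict (Int × Int) Int) (F : List (Int × Int)) (h : pvKInv R C d) :
    pvKInv R C (pvStepA g R C v d F).1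
      ∧ d.size + (pvStepA g R C v d F).2.length ≤ (pvStepA g R C v d F).1.size := by
  unfold pvStepA
  have main := pvFoldlInv
    (Inv := fun (st : PySem.Dict (Int × Int) Int × List (Int × Int)) =>
      pvKInv R C st.1 ∧ d.size + st.2.length ≤ st.1.size)
    (f := fun st n => (pvDF g R C v st.1 n, st.2 ++ pvDG g R C v st.1 n))
    (l := pvEdges F) (s0 := (d, []))
    (by exact ⟨h, by simp⟩)
    ?_
  · exact main
  · rintro ⟨d', acc⟩ n _ ⟨hk, hsz⟩
    have hnd := hk.1
    have hinb := hk.2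
    simp only [pvDF, pvDG] at *
    by_cases h1 : pvInb R C n ∧ d'.contains n = false
    · have hfresh : d'.contains n = false := h1.2
      have hszi : (d'.insert n v).size = d'.size + 1 := by
        rw [PySem.Dict.size_insert]; simp [hfresh]
      have hki : pvKInv R C (d'.insert n v) := by
        constructor
        · exact PySem.Dict.nodup_keys_insert d' n v hnd
        · intro p hp
          rw [PySem.Dict.mem_keys_insert] at hp
          rcases hp with rfl | hp
          · exact h1.1
          · exact hinb p hp
      by_cases h2 : pvAt g n.1 n.2 == " "
      · rw [if_pos h1, if_pos h2, if_pos ⟨h1.1, h1.2, h2⟩]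
        refine ⟨hki, ?_⟩
        simp only [List.length_append, List.length_cons, List.length_nil, hszi]
        omega
      · have hgd : ¬(pvInb R C n ∧ d'.contains n = false ∧ (pvAt g n.1 n.2 == " ") = true) := by
          intro hcon; exact h2 hcon.2.2
        rw [if_pos h1, if_neg h2, if_neg hgd]
        by_cases h3 : pvAt g n.1 n.2 == "X"
        · rw [if_pos h3]
          refine ⟨hki, ?_⟩
          simp only [List.append_nil, hszi]
          omega
        · rw [if_neg h3]
          simpa using ⟨hk, hsz⟩
    · have hgd : ¬(pvInb R C n ∧ d'.contains n = false ∧ (pvAt g n.1 n.2 == " ") = true) := by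
        intro hcon; exact h1 ⟨hcon.1, hcon.2.1⟩
      rw [if_neg h1, if_neg hgd]
      simpa using ⟨hk, hsz⟩

theorem pvSize_le (R C : Int) (d : PySem.Dict (Int × Int) Int) (h : pvKInv R C d) :
    d.size ≤ R.toNat * C.toNat := by
  obtain ⟨hnd, hinb⟩ := h
  have hsz : d.size = d.keys.length := by
    simp [PySem.Dict.size, PySem.Dict.keys]
  rw [hsz, ← List.toFinset_card_of_nodup hnd]
  have hsub : d.keys.toFinset ⊆ Finset.Ico (0 : Int) R ×ˢ Finset.Ico (0 : Int) C := by
    intro p hp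
    rw [List.mem_toFinset] at hp
    have := hinb p hp
    obtain ⟨h1, h2, h3, h4⟩ := this
    simp [Finset.mem_product, Finset.mem_Ico]
    omega
  calc d.keys.toFinset.card ≤ (Finset.Ico (0 : Int) R ×ˢ Finset.Ico (0 : Int) C).card :=
        Finset.card_le_card hsub
    _ = R.toNat * C.toNat := by
        rw [Finset.card_product, Int.card_Ico, Int.card_Ico]
        simp

theorem pvRunA_kinv (g : List (List String)) (R C : Int) :
    ∀ (m : Nat) (k : Int) (d : PySem.Dict (Int × Int) Int) (F : List (Int × Int)),
      pvKInv R C d → pvKInv R C (pvRunA g R C m k d F).1 := by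
  intro m
  induction m with
  | zero => intro k d F h; exact h
  | succ m ih =>
    intro k d F h
    exact ih (k + 1) _ _ (pvStepA_grow g R C (k + 1) d F h).1

theorem pvPops_le (g : List (List String)) (R C : Int) :
    ∀ (m : Nat) (k : Int) (d : PySem.Dict (Int × Int) Int) (F : List (Int × Int)),
      pvKInv R C d →
      pvPops g R C m k d F + d.size ≤ F.length + R.toNat * C.toNat := by
  intro m
  induction m with
  | zero =>
    intro k d F h
    have := pvSize_le R C d h
    simp [pvPops]
    omega
  | succ m ih =>
    intro k d F h
    have hg := pvStepA_grow g R C (k + 1) d F h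
    have hih := ih (k + 1) (pvStepA g R C (k + 1) d F).1 (pvStepA g R C (k + 1) d F).2 hg.1
    rw [pvPops]
    omega

theorem pvRunA_nil (g : List (List String)) (R C : Int) :
    ∀ (m : Nat) (k : Int) (d : PySem.Dict (Int × Int) Int), pvRunA g R C m k d [] = (d, []) := by
  intro m
  induction m with
  | zero => intro k d; rfl
  | succ m ih =>
    intro k d
    rw [pvRunA, show pvStepA g R C (k + 1) d [] = (d, []) from rfl]
    exact ih (k + 1) d

theorem pvRunA_sizes (g : List (List String)) (R C : Int) :
    ∀ (m : Nat) (k : Int) (d : PySem.Dict (Int × Int) Int) (F : List (Int × Int)),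
      pvKInv R C d → (pvRunA g R C m k d F).2 ≠ [] →
      d.size + m ≤ (pvRunA g R C m k d F).1.size := by
  intro m
  induction m with
  | zero => intro k d F h hne; simp [pvRunA]
  | succ m ih =>
    intro k d F h hne
    rw [pvRunA] at hne ⊢
    set S := pvStepA g R C (k + 1) d F with hS
    have hg := pvStepA_grow g R C (k + 1) d F h
    rw [← hS] at hg
    by_cases hF' : S.2 = []
    · rw [hF', pvRunA_nil] at hne
      simp at hne
    · have hlen : 1 ≤ S.2.length := by
        cases hS2 : S.2 with
        | nil => exact absurd hS2 hF'
        | cons a l => simp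
      have := ih (k + 1) S.1 S.2 hg.1 hne
      omega

theorem pvRunA_empties (g : List (List String)) (R C : Int)
    (k : Int) (d : PySem.Dict (Int × Int) Int) (F : List (Int × Int)) (h : pvKInv R C d) :
    (pvRunA g R C (R.toNat * C.toNat + 1) k d F).2 = [] := by
  by_contra hne
  have h1 := pvRunA_sizes g R C (R.toNat * C.toNat + 1) k d F h hne
  have h2 := pvSize_le R C (pvRunA g R C (R.toNat * C.toNat + 1) k d F).1
    (pvRunA_kinv g R C _ k d F h)
  omega

theorem pvBfsA_nilq (g : List (List String)) (R C : Int) (f : Nat)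
    (d : PySem.Dict (Int × Int) Int) : pvBfsA g R C f [] d = d := by
  cases f <;> rfl

-- the A port's BFS is the (R*C+1)-level run
theorem pvBfsA_final (g : List (List String)) (R C : Int)
    (d : PySem.Dict (Int × Int) Int) (F : List (Int × Int)) (h : pvKInv R C d) :
    pvBfsA g R C (F.length + R.toNat * C.toNat) (F.map (fun p => (p.1, p.2, 0))) d
      = (pvRunA g R C (R.toNat * C.toNat + 1) 0 d F).1 := by
  set M := R.toNat * C.toNat + 1 with hM
  have hpops := pvPops_le g R C M 0 d F h
  have hf : F.length + R.toNat * C.toNat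
      = pvPops g R C M 0 d F + (F.length + R.toNat * C.toNat - pvPops g R C M 0 d F) := by
    omega
  rw [hf, pvDrainRun g R C M 0 d F _]
  rw [pvRunA_empties g R C 0 d F h]
  simp [pvBfsA_nilq]

def pvOldCand (_g : List (List String)) (k : Int) (dB : PySem.Dict (Int × Int) Int)
    (x : Int × Int) : List Int :=
  (pvNbrs x.1 x.2).filterMap (fun n => (dB.get? n).filter (fun v => decide (v < k)))

theorem pvOldCand_mem (g : List (List String)) (k : Int) (dB : PySem.Dict (Int × Int) Int)
    (x : Int × Int) (v : Int) :
    v ∈ pvOldCand g k dB x ↔ (∃ n ∈ pvNbrs x.1 x.2, dB.get? n = some v) ∧ v < k := by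
  unfold pvOldCand
  simp [List.mem_filterMap, Option.filter_eq_some_iff]
  tauto

theorem pvOmin_singleton (a : Int) : pvOmin [a] = some (a + 1) := by
  unfold pvOmin
  rw [(pvMinChar [a] a).mpr (by simp)]
  rfl

theorem pvOmin_append_k (l : List Int) (k : Int) (h : ∀ v ∈ l, v < k) (hne : l ≠ []) :
    pvOmin (l ++ [k]) = pvOmin l := by
  unfold pvOmin
  cases hmin : PySem.List.min? l (fun v => v) with
  | none => rw [PySem.List.min?_eq_none_iff] at hmin; exact absurd hmin hne
  | some m =>
    rw [pvMinChar] at hmin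
    rw [(pvMinChar (l ++ [k]) m).mpr ?_]
    · constructor
      · simp [hmin.1]
      · intro y hy
        rcases List.mem_append.mp hy with hy | hy
        · exact hmin.2 y hy
        · simp at hy
          subst hy
          exact le_of_lt (h m hmin.1)

def pvMidCand (g : List (List String)) (k : Int) (dB0 : PySem.Dict (Int × Int) Int)
    (Lp : List (Int × Int)) (x : Int × Int) : List Int :=
  pvOldCand g k dB0 x ++ (if x ∈ Lp then [k] else [])

theorem pvMidCand_mem (g : List (List String)) (k : Int) (dB0 : PySem.Dict (Int × Int) Int)
    (Lp : List (Int × Int)) (x : Int × Int) (v : Int) :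
    v ∈ pvMidCand g k dB0 Lp x
      ↔ ((∃ n ∈ pvNbrs x.1 x.2, dB0.get? n = some v) ∧ v < k) ∨ (v = k ∧ x ∈ Lp) := by
  unfold pvMidCand
  rw [List.mem_append, pvOldCand_mem]
  by_cases hx : x ∈ Lp <;> simp [hx]

-- level-start parallel invariant
def pvPI (g : List (List String)) (R C : Int) (k : Int)
    (dA dB : PySem.Dict (Int × Int) Int) (F : List (Int × Int)) : Prop :=
  (∀ x, pvAt g x.1 x.2 ≠ "X" → dA.get? x = dB.get? x)
  ∧ (∀ x, pvInb R C x → pvAt g x.1 x.2 = "X" → dA.get? x = pvOmin (pvOldCand g k dB x))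
  ∧ (∀ x, ¬ pvInb R C x → dA.get? x = none ∧ dB.get? x = none)
  ∧ (∀ x v, dB.get? x = some v → pvInb R C x ∧ v ≤ k ∧ (pvAt g x.1 x.2 = "D" ∨ pvAt g x.1 x.2 = " "))
  ∧ (∀ x, dB.get? x = some k ↔ x ∈ F)

-- mid-level invariant, parametrised by the processed prefix Lp of the edge list
def pvMI (g : List (List String)) (R C : Int) (k : Int) (dB0 : PySem.Dict (Int × Int) Int)
    (Lp : List (Int × Int)) (stA stB : PySem.Dict (Int × Int) Int × List (Int × Int)) : Prop :=
  stA.2 = stB.2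
  ∧ (∀ x, pvAt g x.1 x.2 ≠ "X" → stA.1.get? x = stB.1.get? x)
  ∧ (∀ x, pvInb R C x → pvAt g x.1 x.2 = "X" →
      stA.1.get? x = pvOmin (pvMidCand g k dB0 Lp x))
  ∧ (∀ x, ¬ pvInb R C x → stA.1.get? x = none ∧ stB.1.get? x = none)
  ∧ (∀ x v, stB.1.get? x = some v →
      dB0.get? x = some v
        ∨ (v = k + 1 ∧ pvInb R C x ∧ pvAt g x.1 x.2 = " " ∧ dB0.get? x = none ∧ x ∈ Lp))
  ∧ (∀ x, pvInb R C x → pvAt g x.1 x.2 = " " → dB0.get? x = none → x ∈ Lp →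
      stB.1.get? x = some (k + 1))
  ∧ (∀ x v, dB0.get? x = some v → stB.1.get? x = some v)
  ∧ (∀ x, x ∈ stB.2 ↔ (pvInb R C x ∧ pvAt g x.1 x.2 = " " ∧ dB0.get? x = none ∧ x ∈ Lp))

theorem pvMidCand_ne (g : List (List String)) (k : Int) (dB0 : PySem.Dict (Int × Int) Int)
    (Lp : List (Int × Int)) {x n : Int × Int} (hx : x ≠ n) :
    pvMidCand g k dB0 (Lp ++ [n]) x = pvMidCand g k dB0 Lp x := by
  unfold pvMidCand
  congr 1
  have hiff : (x ∈ Lp ++ [n]) ↔ x ∈ Lp := by simp [List.mem_append, hx]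
  exact if_congr hiff rfl rfl

theorem pvMidCand_self_not_mem (g : List (List String)) (k : Int)
    (dB0 : PySem.Dict (Int × Int) Int) (Lp : List (Int × Int)) {n : Int × Int} (hn : n ∉ Lp) :
    pvMidCand g k dB0 Lp n = pvOldCand g k dB0 n := by
  unfold pvMidCand
  simp [hn]

theorem pvMidCand_self_append (g : List (List String)) (k : Int)
    (dB0 : PySem.Dict (Int × Int) Int) (Lp : List (Int × Int)) (n : Int × Int) :
    pvMidCand g k dB0 (Lp ++ [n]) n = pvOldCand g k dB0 n ++ [k] := by
  unfold pvMidCand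
  simp

theorem pvMidCand_self_mem (g : List (List String)) (k : Int)
    (dB0 : PySem.Dict (Int × Int) Int) (Lp : List (Int × Int)) {n : Int × Int} (hn : n ∈ Lp) :
    pvMidCand g k dB0 (Lp ++ [n]) n = pvMidCand g k dB0 Lp n := by
  unfold pvMidCand
  simp [hn]

theorem pvMIStep (g : List (List String)) (R C : Int) (k : Int)
    (dB0 : PySem.Dict (Int × Int) Int)
    (_hB0 : ∀ x v, dB0.get? x = some v →
      pvInb R C x ∧ v ≤ k ∧ (pvAt g x.1 x.2 = "D" ∨ pvAt g x.1 x.2 = " "))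
    (Lp : List (Int × Int)) (stA stB : PySem.Dict (Int × Int) Int × List (Int × Int))
    (n : Int × Int) (h : pvMI g R C k dB0 Lp stA stB) :
    pvMI g R C k dB0 (Lp ++ [n])
      (pvDF g R C (k + 1) stA.1 n, stA.2 ++ pvDG g R C (k + 1) stA.1 n)
      (pvBF g R C (k + 1) stB.1 n, stB.2 ++ pvDG g R C (k + 1) stB.1 n) := by
  obtain ⟨hfr, ha, hb, hninb, hc, hc', hp, he⟩ := h
  by_cases hinb : pvInb R C n
  case neg =>
    -- out-of-bounds neighbour: nothing happens
    have hA : pvDF g R C (k + 1) stA.1 n = stA.1 := by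
      unfold pvDF; rw [if_neg (by tauto)]
    have hB : pvBF g R C (k + 1) stB.1 n = stB.1 := by
      unfold pvBF; rw [if_neg (by tauto)]
    have hGA : pvDG g R C (k + 1) stA.1 n = [] := by
      unfold pvDG; rw [if_neg (by tauto)]
    have hGB : pvDG g R C (k + 1) stB.1 n = [] := by
      unfold pvDG; rw [if_neg (by tauto)]
    rw [hA, hB, hGA, hGB]
    refine ⟨by simpa using hfr, by simpa using ha, ?_, by simpa using hninb, ?_, ?_, by simpa using hp, ?_⟩
    · intro x hxinb hxX
      have hxn : x ≠ n := fun hcon => hinb (hcon ▸ hxinb)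
      rw [pvMidCand_ne g k dB0 Lp hxn]
      exact hb x hxinb hxX
    · intro x v hv
      rcases hc x v hv with h1 | h1
      · exact Or.inl h1
      · exact Or.inr ⟨h1.1, h1.2.1, h1.2.2.1, h1.2.2.2.1, List.mem_append_left _ h1.2.2.2.2⟩
    · intro x hxinb hxsp hx0 hxmem
      have hxn : x ≠ n := fun hcon => hinb (hcon ▸ hxinb)
      have : x ∈ Lp := by
        rcases List.mem_append.mp hxmem with h1 | h1
        · exact h1
        · simp at h1; exact absurd h1 hxn
      exact hc' x hxinb hxsp hx0 this
    · intro x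
      simp only [List.append_nil]
      rw [he x]
      constructor
      · rintro ⟨h1, h2, h3, h4⟩
        exact ⟨h1, h2, h3, List.mem_append_left _ h4⟩
      · rintro ⟨h1, h2, h3, h4⟩
        have hxn : x ≠ n := fun hcon => hinb (hcon ▸ h1)
        refine ⟨h1, h2, h3, ?_⟩
        rcases List.mem_append.mp h4 with h5 | h5
        · exact h5
        · simp at h5; exact absurd h5 hxn
  case pos =>
    by_cases hsp : pvAt g n.1 n.2 = " "
    · -- road neighbour
      have hnX : pvAt g n.1 n.2 ≠ "X" := by rw [hsp]; decide
      have hcteq : stA.1.contains n = stB.1.contains n := by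
        rw [PySem.Dict.contains_eq_isSome_get?, PySem.Dict.contains_eq_isSome_get?, ha n hnX]
      by_cases hct : stB.1.contains n = false
      · -- fresh road cell: both sides insert and enqueue it
        have hctA : stA.1.contains n = false := by rw [hcteq]; exact hct
        have hBn : stB.1.get? n = none := (PySem.Dict.get?_eq_none_iff_contains _ _).mpr hct
        have hdb0 : dB0.get? n = none := by
          cases hdb : dB0.get? n with
          | none => rfl
          | some v => rw [hp n v hdb] at hBn; cases hBn
        have hA : pvDF g R C (k + 1) stA.1 n = stA.1.insert n (k + 1) := by
          unfold pvDF; rw [if_pos ⟨hinb, hctA⟩, if_pos (by simp [hsp])]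
        have hB : pvBF g R C (k + 1) stB.1 n = stB.1.insert n (k + 1) := by
          unfold pvBF; rw [if_pos ⟨hinb, hct, by simp [hsp]⟩]
        have hGA : pvDG g R C (k + 1) stA.1 n = [n] := by
          unfold pvDG; rw [if_pos ⟨hinb, hctA, by simp [hsp]⟩]
        have hGB : pvDG g R C (k + 1) stB.1 n = [n] := by
          unfold pvDG; rw [if_pos ⟨hinb, hct, by simp [hsp]⟩]
        rw [hA, hB, hGA, hGB]
        refine ⟨by rw [hfr], ?_, ?_, ?_, ?_, ?_, ?_, ?_⟩
        · intro x hxX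
          by_cases hxn : x = n
          · subst hxn
            rw [PySem.Dict.get?_insert_self, PySem.Dict.get?_insert_self]
          · rw [PySem.Dict.get?_insert_of_ne _ _ hxn, PySem.Dict.get?_insert_of_ne _ _ hxn]
            exact ha x hxX
        · intro x hxinb hxX
          have hxn : x ≠ n := by
            intro hcon; subst hcon; rw [hxX] at hsp; exact absurd hsp (by decide)
          rw [PySem.Dict.get?_insert_of_ne _ _ hxn, pvMidCand_ne g k dB0 Lp hxn]
          exact hb x hxinb hxX
        · intro x hxninb
          have hxn : x ≠ n := fun hcon => hxninb (hcon ▸ hinb)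
          rw [PySem.Dict.get?_insert_of_ne _ _ hxn, PySem.Dict.get?_insert_of_ne _ _ hxn]
          exact hninb x hxninb
        · intro x v hxv
          by_cases hxn : x = n
          · subst hxn
            rw [PySem.Dict.get?_insert_self] at hxv
            injection hxv with hv
            exact Or.inr ⟨hv.symm, hinb, hsp, hdb0, by simp⟩
          · rw [PySem.Dict.get?_insert_of_ne _ _ hxn] at hxv
            rcases hc x v hxv with h1 | h1
            · exact Or.inl h1
            · exact Or.inr ⟨h1.1, h1.2.1, h1.2.2.1, h1.2.2.2.1, List.mem_append_left _ h1.2.2.2.2⟩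
        · intro x hxinb hxsp hx0 hxmem
          by_cases hxn : x = n
          · subst hxn; rw [PySem.Dict.get?_insert_self]
          · rw [PySem.Dict.get?_insert_of_ne _ _ hxn]
            have : x ∈ Lp := by
              rcases List.mem_append.mp hxmem with h1 | h1
              · exact h1
              · simp at h1; exact absurd h1 hxn
            exact hc' x hxinb hxsp hx0 this
        · intro x v hxv
          have hxn : x ≠ n := by
            intro hcon; subst hcon; rw [hdb0] at hxv; cases hxv
          rw [PySem.Dict.get?_insert_of_ne _ _ hxn]
          exact hp x v hxv
        · intro x
          constructor
          · intro hx
            rcases List.mem_append.mp hx with hx | hx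
            · obtain ⟨h1, h2, h3, h4⟩ := (he x).mp hx
              exact ⟨h1, h2, h3, List.mem_append_left _ h4⟩
            · simp at hx; subst hx
              exact ⟨hinb, hsp, hdb0, by simp⟩
          · rintro ⟨h1, h2, h3, h4⟩
            rcases List.mem_append.mp h4 with h5 | h5
            · exact List.mem_append_left _ ((he x).mpr ⟨h1, h2, h3, h5⟩)
            · simp at h5; subst h5; simp
      · -- already recorded road cell: both sides skip it
        have hct' : stB.1.contains n = true := by
          revert hct; cases stB.1.contains n <;> simp
        have hctA : stA.1.contains n = true := by rw [hcteq]; exact hct'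
        have hA : pvDF g R C (k + 1) stA.1 n = stA.1 := by
          unfold pvDF; rw [if_neg (by simp [hctA])]
        have hB : pvBF g R C (k + 1) stB.1 n = stB.1 := by
          unfold pvBF; rw [if_neg (by simp [hct'])]
        have hGA : pvDG g R C (k + 1) stA.1 n = [] := by
          unfold pvDG; rw [if_neg (by simp [hctA])]
        have hGB : pvDG g R C (k + 1) stB.1 n = [] := by
          unfold pvDG; rw [if_neg (by simp [hct'])]
        rw [hA, hB, hGA, hGB]
        have hsome : ∃ v, stB.1.get? n = some v := by
          rw [PySem.Dict.contains_eq_isSome_get?] at hct'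
          exact Option.isSome_iff_exists.mp hct'
        refine ⟨by simpa using hfr, by simpa using ha, ?_, by simpa using hninb, ?_, ?_, by simpa using hp, ?_⟩
        · intro x hxinb hxX
          have hxn : x ≠ n := by
            intro hcon; subst hcon; rw [hxX] at hsp; exact absurd hsp (by decide)
          rw [pvMidCand_ne g k dB0 Lp hxn]
          exact hb x hxinb hxX
        · intro x v hxv
          rcases hc x v hxv with h1 | h1
          · exact Or.inl h1
          · exact Or.inr ⟨h1.1, h1.2.1, h1.2.2.1, h1.2.2.2.1, List.mem_append_left _ h1.2.2.2.2⟩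
        · intro x hxinb hxsp hx0 hxmem
          by_cases hxn : x = n
          · subst hxn
            obtain ⟨v', hv'⟩ := hsome
            rcases hc x v' hv' with h1 | h1
            · rw [hx0] at h1; cases h1
            · rw [hv', h1.1]
          · have : x ∈ Lp := by
              rcases List.mem_append.mp hxmem with h1 | h1
              · exact h1
              · simp at h1; exact absurd h1 hxn
            exact hc' x hxinb hxsp hx0 this
        · intro x
          simp only [List.append_nil]
          rw [he x]
          constructor
          · rintro ⟨h1, h2, h3, h4⟩
            exact ⟨h1, h2, h3, List.mem_append_left _ h4⟩
          · rintro ⟨h1, h2, h3, h4⟩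
            refine ⟨h1, h2, h3, ?_⟩
            rcases List.mem_append.mp h4 with h5 | h5
            · exact h5
            · simp at h5; subst h5
              obtain ⟨v', hv'⟩ := hsome
              rcases hc x v' hv' with h6 | h6
              · rw [h3] at h6; cases h6
              · exact h6.2.2.2.2
    · -- non-road neighbour: the B side never touches it
      have hB : pvBF g R C (k + 1) stB.1 n = stB.1 := by
        unfold pvBF; rw [if_neg (by simp [hsp])]
      have hGA : pvDG g R C (k + 1) stA.1 n = [] := by
        unfold pvDG; rw [if_neg (by simp [hsp])]
      have hGB : pvDG g R C (k + 1) stB.1 n = [] := by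
        unfold pvDG; rw [if_neg (by simp [hsp])]
      by_cases hsx : pvAt g n.1 n.2 = "X"
      · -- obstacle: the A side may stamp it
        by_cases hctA : stA.1.contains n = false
        · -- fresh stamp
          have hA : pvDF g R C (k + 1) stA.1 n = stA.1.insert n (k + 1) := by
            unfold pvDF
            rw [if_pos ⟨hinb, hctA⟩, if_neg (by simp [hsx]), if_pos (by simp [hsx])]
          have hAn : stA.1.get? n = none := (PySem.Dict.get?_eq_none_iff_contains _ _).mpr hctA
          have hmidnil : pvMidCand g k dB0 Lp n = [] := by
            have := hb n hinb hsx
            rw [hAn] at this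
            exact (pvOmin_eq_none_iff _).mp this.symm
          have holdnil : pvOldCand g k dB0 n = [] ∧ n ∉ Lp := by
            unfold pvMidCand at hmidnil
            rcases List.append_eq_nil_iff.mp hmidnil with ⟨h1, h2⟩
            refine ⟨h1, ?_⟩
            intro hcon
            rw [if_pos hcon] at h2
            cases h2
          rw [hA, hB, hGA, hGB]
          refine ⟨by simpa using hfr, ?_, ?_, ?_, ?_, ?_, by simpa using hp, ?_⟩
          · intro x hxX
            have hxn : x ≠ n := by
              intro hcon; subst hcon; exact hxX hsx
            rw [PySem.Dict.get?_insert_of_ne _ _ hxn]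
            exact ha x hxX
          · intro x hxinb hxX
            by_cases hxn : x = n
            · subst hxn
              rw [PySem.Dict.get?_insert_self, pvMidCand_self_append, holdnil.1,
                List.nil_append, pvOmin_singleton]
            · rw [PySem.Dict.get?_insert_of_ne _ _ hxn, pvMidCand_ne g k dB0 Lp hxn]
              exact hb x hxinb hxX
          · intro x hxninb
            have hxn : x ≠ n := fun hcon => hxninb (hcon ▸ hinb)
            rw [PySem.Dict.get?_insert_of_ne _ _ hxn]
            exact hninb x hxninb
          · intro x v hxv
            rcases hc x v hxv with h1 | h1
            · exact Or.inl h1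
            · exact Or.inr ⟨h1.1, h1.2.1, h1.2.2.1, h1.2.2.2.1, List.mem_append_left _ h1.2.2.2.2⟩
          · intro x hxinb hxsp' hx0 hxmem
            have hxn : x ≠ n := by
              intro hcon; subst hcon; exact hsp hxsp'
            have : x ∈ Lp := by
              rcases List.mem_append.mp hxmem with h1 | h1
              · exact h1
              · simp at h1; exact absurd h1 hxn
            exact hc' x hxinb hxsp' hx0 this
          · intro x
            simp only [List.append_nil]
            rw [he x]
            constructor
            · rintro ⟨h1, h2, h3, h4⟩
              exact ⟨h1, h2, h3, List.mem_append_left _ h4⟩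
            · rintro ⟨h1, h2, h3, h4⟩
              have hxn : x ≠ n := by
                intro hcon; subst hcon; exact hsp h2
              refine ⟨h1, h2, h3, ?_⟩
              rcases List.mem_append.mp h4 with h5 | h5
              · exact h5
              · simp at h5; exact absurd h5 hxn
        · -- obstacle already stamped (or seen): nothing changes
          have hA : pvDF g R C (k + 1) stA.1 n = stA.1 := by
            unfold pvDF; rw [if_neg (by simp [hctA])]
          rw [hA, hB, hGA, hGB]
          refine ⟨by simpa using hfr, by simpa using ha, ?_, by simpa using hninb, ?_, ?_, by simpa using hp, ?_⟩
          · intro x hxinb hxX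
            by_cases hxn : x = n
            · subst hxn
              by_cases hnLp : x ∈ Lp
              · rw [pvMidCand_self_mem g k dB0 Lp hnLp]
                exact hb x hxinb hxX
              · have hbn := hb x hxinb hxX
                rw [pvMidCand_self_not_mem g k dB0 Lp hnLp] at hbn
                rw [pvMidCand_self_append]
                have hAnsome : stA.1.get? x ≠ none := by
                  intro hcon
                  rw [PySem.Dict.get?_eq_none_iff_contains] at hcon
                  exact hctA hcon
                rw [pvOmin_append_k]
                · exact hbn
                · intro v hv
                  exact ((pvOldCand_mem g k dB0 x v).mp hv).2
                · intro hcon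
                  rw [hcon] at hbn
                  exact hAnsome (by rw [hbn]; rfl)
            · rw [pvMidCand_ne g k dB0 Lp hxn]
              exact hb x hxinb hxX
          · intro x v hxv
            rcases hc x v hxv with h1 | h1
            · exact Or.inl h1
            · exact Or.inr ⟨h1.1, h1.2.1, h1.2.2.1, h1.2.2.2.1, List.mem_append_left _ h1.2.2.2.2⟩
          · intro x hxinb hxsp' hx0 hxmem
            have hxn : x ≠ n := by
              intro hcon; subst hcon; exact hsp hxsp'
            have : x ∈ Lp := by
              rcases List.mem_append.mp hxmem with h1 | h1
              · exact h1
              · simp at h1; exact absurd h1 hxn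
            exact hc' x hxinb hxsp' hx0 this
          · intro x
            simp only [List.append_nil]
            rw [he x]
            constructor
            · rintro ⟨h1, h2, h3, h4⟩
              exact ⟨h1, h2, h3, List.mem_append_left _ h4⟩
            · rintro ⟨h1, h2, h3, h4⟩
              have hxn : x ≠ n := by
                intro hcon; subst hcon; exact hsp h2
              refine ⟨h1, h2, h3, ?_⟩
              rcases List.mem_append.mp h4 with h5 | h5
              · exact h5
              · simp at h5; exact absurd h5 hxn
      · -- a cell that is neither road nor obstacle: both sides skip it
        have hA : pvDF g R C (k + 1) stA.1 n = stA.1 := by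
          unfold pvDF
          split_ifs with h1 h2 h3
          · exact absurd (by simpa using h2) hsp
          · exact absurd (by simpa using h3) hsx
          · rfl
          · rfl
        rw [hA, hB, hGA, hGB]
        refine ⟨by simpa using hfr, by simpa using ha, ?_, by simpa using hninb, ?_, ?_, by simpa using hp, ?_⟩
        · intro x hxinb hxX
          have hxn : x ≠ n := by
            intro hcon; subst hcon; exact hsx hxX
          rw [pvMidCand_ne g k dB0 Lp hxn]
          exact hb x hxinb hxX
        · intro x v hxv
          rcases hc x v hxv with h1 | h1
          · exact Or.inl h1
          · exact Or.inr ⟨h1.1, h1.2.1, h1.2.2.1, h1.2.2.2.1, List.mem_append_left _ h1.2.2.2.2⟩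
        · intro x hxinb hxsp' hx0 hxmem
          have hxn : x ≠ n := by
            intro hcon; subst hcon; exact hsp hxsp'
          have : x ∈ Lp := by
            rcases List.mem_append.mp hxmem with h1 | h1
            · exact h1
            · simp at h1; exact absurd h1 hxn
          exact hc' x hxinb hxsp' hx0 this
        · intro x
          simp only [List.append_nil]
          rw [he x]
          constructor
          · rintro ⟨h1, h2, h3, h4⟩
            exact ⟨h1, h2, h3, List.mem_append_left _ h4⟩
          · rintro ⟨h1, h2, h3, h4⟩
            have hxn : x ≠ n := by
              intro hcon; subst hcon; exact hsp h2
            refine ⟨h1, h2, h3, ?_⟩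
            rcases List.mem_append.mp h4 with h5 | h5
            · exact h5
            · simp at h5; exact absurd h5 hxn

theorem pvMIFold (g : List (List String)) (R C : Int) (k : Int)
    (dB0 : PySem.Dict (Int × Int) Int)
    (_hB0 : ∀ x v, dB0.get? x = some v →
      pvInb R C x ∧ v ≤ k ∧ (pvAt g x.1 x.2 = "D" ∨ pvAt g x.1 x.2 = " ")) :
    ∀ (E Lp : List (Int × Int)) (stA stB : PySem.Dict (Int × Int) Int × List (Int × Int)),
      pvMI g R C k dB0 Lp stA stB →
      pvMI g R C k dB0 (Lp ++ E)
        (E.foldl (fun st n => (pvDF g R C (k + 1) st.1 n, st.2 ++ pvDG g R C (k + 1) st.1 n)) stA)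
        (E.foldl (fun st n => (pvBF g R C (k + 1) st.1 n, st.2 ++ pvDG g R C (k + 1) st.1 n)) stB) := by
  intro E
  induction E with
  | nil => intro Lp stA stB h; simpa using h
  | cons n E' ih =>
    intro Lp stA stB h
    have hstep := pvMIStep g R C k dB0 _hB0 Lp stA stB n h
    have := ih (Lp ++ [n]) _ _ hstep
    rw [List.append_assoc] at this
    simpa using this

theorem pvEdges_mem (F : List (Int × Int)) (x : Int × Int) :
    x ∈ pvEdges F ↔ ∃ p ∈ F, x ∈ pvNbrs p.1 p.2 := by
  simp [pvEdges, List.mem_flatMap]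

theorem pvPIStep (g : List (List String)) (R C : Int) (k : Int)
    (dA dB : PySem.Dict (Int × Int) Int) (F : List (Int × Int))
    (h : pvPI g R C k dA dB F) :
    (pvStepA g R C (k + 1) dA F).2 = (pvStepB g R C (k + 1) dB F).2
      ∧ pvPI g R C (k + 1) (pvStepA g R C (k + 1) dA F).1 (pvStepB g R C (k + 1) dB F).1
          (pvStepB g R C (k + 1) dB F).2 := by
  obtain ⟨ha, hb, hninb, hcB, hdB⟩ := h
  have hB0 := hcB
  have hmi0 : pvMI g R C k dB [] (dA, []) (dB, []) := by
    refine ⟨rfl, ha, ?_, ?_, ?_, ?_, ?_, ?_⟩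
    · intro x hxinb hxX
      rw [show pvMidCand g k dB [] x = pvOldCand g k dB x from by unfold pvMidCand; simp]
      exact hb x hxinb hxX
    · exact hninb
    · intro x v hv; exact Or.inl hv
    · intro x _ _ _ hx; cases hx
    · intro x v hv; exact hv
    · intro x; simp
  have hmi := pvMIFold g R C k dB hB0 (pvEdges F) [] (dA, []) (dB, []) hmi0
  rw [List.nil_append] at hmi
  obtain ⟨hfr, ha', hb', hninb', hc', hcc', hp', he'⟩ := hmi
  have hfr2 : (pvStepA g R C (k + 1) dA F).2 = (pvStepB g R C (k + 1) dB F).2 := hfr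
  have ha2 : ∀ x, pvAt g x.1 x.2 ≠ "X" →
      (pvStepA g R C (k + 1) dA F).1.get? x = (pvStepB g R C (k + 1) dB F).1.get? x := ha'
  have hb2 : ∀ x, pvInb R C x → pvAt g x.1 x.2 = "X" →
      (pvStepA g R C (k + 1) dA F).1.get? x = pvOmin (pvMidCand g k dB (pvEdges F) x) := hb'
  have hninb2 : ∀ x, ¬ pvInb R C x →
      (pvStepA g R C (k + 1) dA F).1.get? x = none
        ∧ (pvStepB g R C (k + 1) dB F).1.get? x = none := hninb'
  have hc2 : ∀ x v, (pvStepB g R C (k + 1) dB F).1.get? x = some v →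
      dB.get? x = some v
        ∨ (v = k + 1 ∧ pvInb R C x ∧ pvAt g x.1 x.2 = " " ∧ dB.get? x = none ∧ x ∈ pvEdges F) := hc'
  have hcc2 : ∀ x, pvInb R C x → pvAt g x.1 x.2 = " " → dB.get? x = none → x ∈ pvEdges F →
      (pvStepB g R C (k + 1) dB F).1.get? x = some (k + 1) := hcc'
  have hp2 : ∀ x v, dB.get? x = some v →
      (pvStepB g R C (k + 1) dB F).1.get? x = some v := hp'
  have he2 : ∀ x, x ∈ (pvStepB g R C (k + 1) dB F).2 ↔
      (pvInb R C x ∧ pvAt g x.1 x.2 = " " ∧ dB.get? x = none ∧ x ∈ pvEdges F) := he'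
  refine ⟨hfr2, ha2, ?_, hninb2, ?_, ?_⟩
  · intro x hxinb hxX
    rw [hb2 x hxinb hxX]
    apply pvOminCongr
    intro v
    rw [pvMidCand_mem, pvOldCand_mem]
    constructor
    · rintro (⟨⟨nn, hnn, hnv⟩, hvk⟩ | ⟨hveq, hxE⟩)
      · exact ⟨⟨nn, hnn, hp2 nn v hnv⟩, by omega⟩
      · rw [pvEdges_mem] at hxE
        obtain ⟨p, hpF, hpn⟩ := hxE
        refine ⟨⟨p, (pvNbrs_symm p x).mp hpn, ?_⟩, by omega⟩
        rw [hveq]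
        exact hp2 p k ((hdB p).mpr hpF)
    · rintro ⟨⟨nn, hnn, hnv⟩, hvk1⟩
      rcases hc2 nn v hnv with hold | hnew
      · have hvk := (hB0 nn v hold).2.1
        by_cases hveq : v = k
        · refine Or.inr ⟨hveq, ?_⟩
          rw [pvEdges_mem]
          refine ⟨nn, (hdB nn).mp ?_, (pvNbrs_symm x nn).mp hnn⟩
          rw [← hveq]
          exact hold
        · exact Or.inl ⟨⟨nn, hnn, hold⟩, by omega⟩
      · omega
  · intro x v hv
    rcases hc2 x v hv with hold | hnew
    · have := hB0 x v hold
      exact ⟨this.1, by omega, this.2.2⟩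
    · exact ⟨hnew.2.1, by omega, Or.inr hnew.2.2.1⟩
  · intro x
    constructor
    · intro hv
      rcases hc2 x (k + 1) hv with hold | hnew
      · have := (hB0 x (k + 1) hold).2.1
        omega
      · exact (he2 x).mpr ⟨hnew.2.1, hnew.2.2.1, hnew.2.2.2.1, hnew.2.2.2.2⟩
    · intro hx
      obtain ⟨h1, h2, h3, h4⟩ := (he2 x).mp hx
      exact hcc2 x h1 h2 h3 h4

theorem pvRunPar (g : List (List String)) (R C : Int) :
    ∀ (m : Nat) (k : Int) (dA dB : PySem.Dict (Int × Int) Int) (F : List (Int × Int)),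
      pvPI g R C k dA dB F →
      (pvRunA g R C m k dA F).2 = (pvRunB g R C m k dB F).2
        ∧ pvPI g R C (k + m) (pvRunA g R C m k dA F).1 (pvRunB g R C m k dB F).1
            (pvRunB g R C m k dB F).2 := by
  intro m
  induction m with
  | zero => intro k dA dB F h; exact ⟨rfl, by simpa using h⟩
  | succ m ih =>
    intro k dA dB F h
    have hstep := pvPIStep g R C k dA dB F h
    have hih := ih (k + 1) (pvStepA g R C (k + 1) dA F).1 (pvStepB g R C (k + 1) dB F).1
      (pvStepB g R C (k + 1) dB F).2 hstep.2
    rw [pvRunA, pvRunB, hstep.1]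
    have hk : k + 1 + (m : Int) = k + ((m + 1 : Nat) : Int) := by push_cast; ring
    rw [hk] at hih
    exact hih

theorem pvInit_rel (g : List (List String)) (R C : Int) :
    (pvInitA g R C).1 = ((pvInitB g R C).2).map (fun p => (p.1, p.2, (0 : Int)))
      ∧ (pvInitA g R C).2 = (pvInitB g R C).1 := by
  unfold pvInitA pvInitB
  exact pvFoldlRel
    (fun (stA : List (Int × Int × Int) × PySem.Dict (Int × Int) Int)
         (stB : PySem.Dict (Int × Int) Int × List (Int × Int)) =>
      stA.1 = stB.2.map (fun p => (p.1, p.2, (0 : Int))) ∧ stA.2 = stB.1)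
    _ _ (PySem.List.pyRange 0 R) _ _ ⟨by simp, rfl⟩
    (fun sA sB i _ hr => pvFoldlRel
      (fun (stA : List (Int × Int × Int) × PySem.Dict (Int × Int) Int)
           (stB : PySem.Dict (Int × Int) Int × List (Int × Int)) =>
        stA.1 = stB.2.map (fun p => (p.1, p.2, (0 : Int))) ∧ stA.2 = stB.1)
      _ _ (PySem.List.pyRange 0 C) _ _ hr
      (fun sA sB j _ hr => by
        by_cases hD : pvAt g i j == "D"
        · simp only [hD, if_true]
          exact ⟨by rw [hr.1]; simp, by rw [hr.2]⟩
        · simp only [hD]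
          simpa using hr))

theorem pvInit_all (g : List (List String)) (R C : Int) :
    (∀ x, (pvInitB g R C).1.get? x
        = if x ∈ (pvInitB g R C).2 then some 0 else none)
      ∧ (∀ x ∈ (pvInitB g R C).2, pvInb R C x ∧ pvAt g x.1 x.2 = "D")
      ∧ pvKInv R C (pvInitB g R C).1 := by
  unfold pvInitB
  apply pvFoldlInv
    (Inv := fun (st : PySem.Dict (Int × Int) Int × List (Int × Int)) =>
      (∀ x, st.1.get? x = if x ∈ st.2 then some 0 else none)
        ∧ (∀ x ∈ st.2, pvInb R C x ∧ pvAt g x.1 x.2 = "D")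
        ∧ pvKInv R C st.1)
  · refine ⟨fun x => by simp [PySem.Dict.get?_empty], fun x hx => absurd hx (by simp), ?_⟩
    constructor
    · have : (PySem.Dict.empty : PySem.Dict (Int × Int) Int).keys = [] := by
        simp [PySem.Dict.keys, PySem.Dict.empty]
      rw [this]
      exact List.nodup_nil
    · intro p hp
      have : (PySem.Dict.empty : PySem.Dict (Int × Int) Int).keys = [] := by
        simp [PySem.Dict.keys, PySem.Dict.empty]
      rw [this] at hp
      cases hp
  · intro st i hi hInv
    apply pvFoldlInv
      (Inv := fun (st : PySem.Dict (Int × Int) Int × List (Int × Int)) =>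
        (∀ x, st.1.get? x = if x ∈ st.2 then some 0 else none)
          ∧ (∀ x ∈ st.2, pvInb R C x ∧ pvAt g x.1 x.2 = "D")
          ∧ pvKInv R C st.1)
    · exact hInv
    · intro st' j hj hInv'
      obtain ⟨hg, hF, hnd, hinb⟩ := hInv'
      by_cases hD : pvAt g i j == "D"
      · simp only [hD, if_true]
      
        have hij : pvInb R C (i, j) := by
          rw [PySem.List.mem_pyRange_one] at hi hj
          exact ⟨hi.1, hi.2, hj.1, hj.2⟩
        refine ⟨?_, ?_, ?_, ?_⟩
        · intro x
          by_cases hx : x = (i, j)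
          · subst hx
            rw [PySem.Dict.get?_insert_self]
            simp
          · rw [PySem.Dict.get?_insert_of_ne _ _ hx, hg x]
            have : (x ∈ st'.2 ++ [(i, j)]) ↔ x ∈ st'.2 := by simp [hx]
            rw [if_congr this rfl rfl]
        · intro x hx
          rcases List.mem_append.mp hx with hx | hx
          · exact hF x hx
          · simp at hx
            subst hx
            exact ⟨hij, by simpa using hD⟩
        · exact PySem.Dict.nodup_keys_insert _ _ _ hnd
        · intro p hp
          rw [PySem.Dict.mem_keys_insert] at hp
          rcases hp with rfl | hp
          · exact hij
          · exact hinb p hp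
      · simp only [hD]
        exact ⟨hg, hF, hnd, hinb⟩

theorem pvPI_init (g : List (List String)) (R C : Int) :
    pvPI g R C 0 (pvInitB g R C).1 (pvInitB g R C).1 (pvInitB g R C).2 := by
  obtain ⟨hg, hF, _⟩ := pvInit_all g R C
  refine ⟨fun x _ => rfl, ?_, ?_, ?_, ?_⟩
  · intro x hxinb hxX
    have h1 : (pvInitB g R C).1.get? x = none := by
      rw [hg x]
      by_cases hx : x ∈ (pvInitB g R C).2
      · have := (hF x hx).2
        rw [this] at hxX
        exact absurd hxX (by decide)
      · rw [if_neg hx]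
    rw [h1, eq_comm, pvOmin_eq_none_iff, List.eq_nil_iff_forall_not_mem]
    intro v hv
    obtain ⟨⟨n, _, hn⟩, hv0⟩ := (pvOldCand_mem g 0 _ x v).mp hv
    rw [hg n] at hn
    by_cases hnF : n ∈ (pvInitB g R C).2
    · rw [if_pos hnF] at hn
      injection hn with hn
      omega
    · rw [if_neg hnF] at hn
      cases hn
  · intro x hxninb
    have h1 : (pvInitB g R C).1.get? x = none := by
      rw [hg x]
      by_cases hx : x ∈ (pvInitB g R C).2
      · exact absurd (hF x hx).1 hxninb
      · rw [if_neg hx]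
    exact ⟨h1, h1⟩
  · intro x v hv
    rw [hg x] at hv
    by_cases hx : x ∈ (pvInitB g R C).2
    · rw [if_pos hx] at hv
      injection hv with hv
      exact ⟨(hF x hx).1, by omega, Or.inl (hF x hx).2⟩
    · rw [if_neg hx] at hv
      cases hv
  · intro x
    rw [hg x]
    by_cases hx : x ∈ (pvInitB g R C).2 <;> simp [hx]

def pvCells (R C : Int) : List (Int × Int) :=
  (PySem.List.pyRange 0 R).flatMap (fun i => (PySem.List.pyRange 0 C).map (fun j => (i, j)))

theorem pvCells_mem (R C : Int) (x : Int × Int) : x ∈ pvCells R C ↔ pvInb R C x := by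
  unfold pvCells pvInb
  simp only [List.mem_flatMap, List.mem_map, PySem.List.mem_pyRange_one]
  constructor
  · rintro ⟨i, hi, j, hj, rfl⟩
    exact ⟨hi.1, hi.2, hj.1, hj.2⟩
  · rintro ⟨h1, h2, h3, h4⟩
    exact ⟨x.1, ⟨h1, h2⟩, x.2, ⟨h3, h4⟩, rfl⟩

-- B's candidate list read from the road dictionary
def pvCandB (road : PySem.Dict (Int × Int) Int) (x : Int × Int) : List Int :=
  (pvNbrs x.1 x.2).foldl (fun acc n => if road.contains n then acc ++ [road.getD n 0] else acc) []

theorem pvCandB_mem (road : PySem.Dict (Int × Int) Int) (x : Int × Int) (v : Int) :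
    v ∈ pvCandB road x ↔ ∃ n ∈ pvNbrs x.1 x.2, road.get? n = some v := by
  unfold pvCandB
  rw [PySem.List.foldl_append_if (fun n => road.contains n) (fun n => road.getD n 0)
    (pvNbrs x.1 x.2) []]
  simp only [List.nil_append, List.mem_map, List.mem_filter]
  constructor
  · rintro ⟨n, ⟨hn, hct⟩, rfl⟩
    refine ⟨n, hn, ?_⟩
    rw [PySem.Dict.contains_eq_isSome_get?] at hct
    obtain ⟨w, hw⟩ := Option.isSome_iff_exists.mp hct
    rw [PySem.Dict.getD_eq_get?_getD, hw]
    rfl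
  · rintro ⟨n, hn, hv⟩
    refine ⟨n, ⟨hn, ?_⟩, ?_⟩
    · rw [PySem.Dict.contains_eq_isSome_get?, hv]; rfl
    · rw [PySem.Dict.getD_eq_get?_getD, hv]; rfl

-- the stamp value B computes for a cell (none = no stamp)
def pvStampV (g : List (List String)) (road : PySem.Dict (Int × Int) Int)
    (x : Int × Int) : Option Int :=
  if pvAt g x.1 x.2 = "X" then pvOmin (pvCandB road x) else none

theorem pvStampFold_get? (g : List (List String)) (road : PySem.Dict (Int × Int) Int)
    (l : List (Int × Int)) :
    ∀ (d : PySem.Dict (Int × Int) Int) (x : Int × Int),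
      (l.foldl (fun d p =>
        match pvStampV g road p with
        | some w => d.insert p w
        | none => d) d).get? x
      = if x ∈ l ∧ pvStampV g road x ≠ none then pvStampV g road x else d.get? x := by
  induction l with
  | nil => intro d x; simp
  | cons p l' ih =>
    intro d x
    rw [List.foldl_cons, ih]
    by_cases hx : x ∈ l' ∧ pvStampV g road x ≠ none
    · rw [if_pos hx, if_pos ⟨by simp [hx.1], hx.2⟩]
    · rw [if_neg hx]
      by_cases hxp : x = p
      · subst hxp
        cases hs : pvStampV g road x with
        | none =>
          rw [if_neg (by simp)]
        | some w =>
          rw [if_pos ⟨by simp, by simp⟩]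
          exact PySem.Dict.get?_insert_self d x w
      · have : ¬(x ∈ p :: l' ∧ pvStampV g road x ≠ none) := by
          intro ⟨h1, h2⟩
          rcases List.mem_cons.mp h1 with h3 | h3
          · exact hxp h3
          · exact hx ⟨h3, h2⟩
        rw [if_neg this]
        cases hs : pvStampV g road p with
        | none => rfl
        | some w => rw [PySem.Dict.get?_insert_of_ne _ _ hxp]

theorem pvPhase2_eq (g : List (List String)) (R C : Int) (road : PySem.Dict (Int × Int) Int) :
    (PySem.List.pyRange 0 R).foldl (fun d i =>
      (PySem.List.pyRange 0 C).foldl (fun d j =>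
        if pvAt g i j == "X" then
          match PySem.List.min? ((pvNbrs i j).foldl (fun acc n =>
            if road.contains n then acc ++ [road.getD n 0] else acc) []) (fun v => v) with
          | some m => d.insert (i, j) (m + 1)
          | none => d
        else d) d) road
    = (pvCells R C).foldl (fun d p =>
        match pvStampV g road p with
        | some w => d.insert p w
        | none => d) road := by
  rw [pvCells, pvFoldlFlat]
  have hout : (fun (d : PySem.Dict (Int × Int) Int) (i : Int) =>
      (PySem.List.pyRange 0 C).foldl (fun d j =>
        if pvAt g i j == "X" then
          match PySem.List.min? ((pvNbrs i j).foldl (fun acc n =>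
            if road.contains n then acc ++ [road.getD n 0] else acc) []) (fun v => v) with
          | some m => d.insert (i, j) (m + 1)
          | none => d
        else d) d)
      = fun (d : PySem.Dict (Int × Int) Int) (i : Int) =>
        ((PySem.List.pyRange 0 C).map (fun j => (i, j))).foldl (fun d p =>
          match pvStampV g road p with
          | some w => d.insert p w
          | none => d) d := by
    funext d i
    rw [List.foldl_map]
    congr 1
    funext d j
    unfold pvStampV
    by_cases hX : pvAt g i j = "X"
    · rw [if_pos (by simp [hX]), if_pos (show pvAt g (i, j).1 (i, j).2 = "X" from hX)]
      rw [show pvCandB road (i, j)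
          = (pvNbrs i j).foldl (fun acc n =>
              if road.contains n then acc ++ [road.getD n 0] else acc) [] from rfl]
      unfold pvOmin
      cases PySem.List.min? ((pvNbrs i j).foldl (fun acc n =>
          if road.contains n then acc ++ [road.getD n 0] else acc) []) (fun v => v) with
      | none => rfl
      | some m => rfl
    · rw [if_neg (by simp [hX]), if_neg (show ¬ pvAt g (i, j).1 (i, j).2 = "X" from hX)]
  rw [hout]

theorem pvRes_eq (d : PySem.Dict (Int × Int) Int) (locations : List (List Int)) :
    locations.foldl (fun res item =>
      if d.contains (PySem.List.pyGetD item 0 0, PySem.List.pyGetD item 1 0) = false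
      then res ++ [(-1 : Int)]
      else res ++ [d.getD (PySem.List.pyGetD item 0 0, PySem.List.pyGetD item 1 0) (-1)]) []
    = locations.map (fun item =>
        d.getD (PySem.List.pyGetD item 0 0, PySem.List.pyGetD item 1 0) (-1)) := by
  have hstep : (fun (res : List Int) (item : List Int) =>
      if d.contains (PySem.List.pyGetD item 0 0, PySem.List.pyGetD item 1 0) = false
      then res ++ [(-1 : Int)]
      else res ++ [d.getD (PySem.List.pyGetD item 0 0, PySem.List.pyGetD item 1 0) (-1)])
      = fun res item =>
        res ++ [d.getD (PySem.List.pyGetD item 0 0, PySem.List.pyGetD item 1 0) (-1)] := by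
    funext res item
    by_cases hct : d.contains (PySem.List.pyGetD item 0 0, PySem.List.pyGetD item 1 0) = false
    · rw [if_pos hct, PySem.Dict.getD_of_not_contains (h := hct)]
    · rw [if_neg hct]
  rw [hstep, PySem.List.foldl_append_singleton_eq_map]
  simp

theorem pvMain (grid : List (List String)) (locations : List (List Int)) :
    getClosedStore grid locations = getClosedStore_alt grid locations := by
  unfold getClosedStore getClosedStore_alt
  by_cases hg : grid = []
  · simp [hg]
  · by_cases hl : locations = []
    · simp [hg, hl]
    · rw [if_neg hg, if_neg hl, if_neg hg, if_neg hl]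
      dsimp only
      set R : Int := (grid.length : Int) with hR
      set C : Int := (grid.headI.length : Int) with hC
      set d0 := (pvInitB grid R C).1 with hd0def
      set F0 := (pvInitB grid R C).2 with hF0def
      obtain ⟨hq0, hd0⟩ := pvInit_rel grid R C
      obtain ⟨hgch, hFch, hkinv⟩ := pvInit_all grid R C
      set K : Nat := grid.length * grid.headI.length with hK
      have hKRC : K = R.toNat * C.toNat := by
        rw [hK, hR, hC]; simp
      -- identify the A-side dictionary
      have hAq : (pvInitA grid R C).1 = F0.map (fun p => (p.1, p.2, (0 : Int))) := hq0
      have hAd : (pvInitA grid R C).2 = d0 := hd0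
      rw [hAq, hAd, List.length_map]
      have hfinal : pvBfsA grid R C (F0.length + K) (F0.map (fun p => (p.1, p.2, (0 : Int)))) d0
          = (pvRunA grid R C (R.toNat * C.toNat + 1) 0 d0 F0).1 := by
        rw [hKRC]
        exact pvBfsA_final grid R C d0 F0 hkinv
      rw [hfinal]
      -- identify the B-side dictionary
      have hroad : pvBfsB grid R C (K + 1) 0 d0 F0
          = (pvRunB grid R C (R.toNat * C.toNat + 1) 0 d0 F0).1 := by
        rw [hKRC]
        exact pvBfsB_eq_run grid R C _ 0 d0 F0
      rw [hroad]
      set M : Nat := R.toNat * C.toNat + 1 with hM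
      set dA := (pvRunA grid R C M 0 d0 F0).1 with hdA
      set road := (pvRunB grid R C M 0 d0 F0).1 with hroaddef
      -- the parallel run invariant at the final level
      have hpar := pvRunPar grid R C M 0 d0 d0 F0 (pvPI_init grid R C)
      have hFempty : (pvRunA grid R C M 0 d0 F0).2 = [] := pvRunA_empties grid R C 0 d0 F0 hkinv
      have hFBempty : (pvRunB grid R C M 0 d0 F0).2 = [] := by rw [← hpar.1]; exact hFempty
      have hPI := hpar.2
      rw [hFBempty] at hPI
      obtain ⟨pa, pb, pninb, pc, pd⟩ := hPI
      set kf : Int := 0 + ((M : Nat) : Int) with hkf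
      -- rewrite B's obstacle pass through its characterisation
      rw [pvPhase2_eq grid R C road]
      -- rewrite A's answer loop
      rw [pvRes_eq]
      -- pointwise equality of the two final dictionaries
      have hkey : ∀ x, dA.get? x
          = ((pvCells R C).foldl (fun d p =>
              match pvStampV grid road p with
              | some w => d.insert p w
              | none => d) road).get? x := by
        intro x
        rw [pvStampFold_get? grid road (pvCells R C) road x]
        by_cases hinb : pvInb R C x
        · by_cases hX : pvAt grid x.1 x.2 = "X"
          · -- obstacle cell
            have hsv : pvStampV grid road x = pvOmin (pvCandB road x) := if_pos hX
            have hroadx : road.get? x = none := by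
              cases hrx : road.get? x with
              | none => rfl
              | some v =>
                have := (pc x v hrx).2.2
                rcases this with hD | hS
                · rw [hD] at hX; exact absurd hX (by decide)
                · rw [hS] at hX; exact absurd hX (by decide)
            have hcand : pvOmin (pvOldCand grid kf road x) = pvOmin (pvCandB road x) := by
              apply pvOminCongr
              intro v
              rw [pvOldCand_mem, pvCandB_mem]
              constructor
              · rintro ⟨h1, _⟩; exact h1
              · rintro ⟨n, hn, hv⟩
                refine ⟨⟨n, hn, hv⟩, ?_⟩
                have hvle := (pc n v hv).2.1
                by_cases hveq : v = kf
                · subst hveq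
                  have := (pd n).mp hv
                  cases this
                · omega
            have hdAx : dA.get? x = pvOmin (pvCandB road x) := by
              rw [pb x hinb hX, hcand]
            cases hnone : pvStampV grid road x with
            | none =>
              rw [if_neg (by simp), hroadx, hdAx, ← hsv, hnone]
            | some w =>
              rw [if_pos ⟨(pvCells_mem R C x).mpr hinb, by simp⟩, hdAx, ← hsv]
              exact hnone
          · -- non-obstacle cell
            have hsv : pvStampV grid road x = none := if_neg hX
            rw [if_neg (by rw [hsv]; simp)]
            exact pa x hX
        · -- out of bounds
          have hcell : x ∉ pvCells R C := fun hcon => hinb ((pvCells_mem R C x).mp hcon)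
          rw [if_neg (by intro hcon; exact hcell hcon.1)]
          rw [(pninb x hinb).1, (pninb x hinb).2]
      -- conclude on the query list
      apply List.map_congr_left
      intro item _
      rw [PySem.Dict.getD_eq_get?_getD, PySem.Dict.getD_eq_get?_getD, hkey]

-- ===== VERDICT (by name: the statement is the Claim_ definition above) =====
theorem getClosedStore_spec : Claim_equal_getClosedStore := by
  intro grid locations _ _
  unfold Spec_getClosedStore
  exact pvMain grid locations
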